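-- pv_equiv track=rewrite | github.com/AustinTSchaffer/DailyProgrammer | MattParkerMathPuzzles/MillionDollarBankBalance/app.py | simulate_competition_entry
-- ===== SOURCE A (Python) =====
-- from typing import Iterable, List, Tuple
--
-- def simulate_bank_balance(deposit1: int, deposit2: int) -> Iterable[int]:
--     """
--     Simulates the following proposal:
--
--     You can make two deposits (of integer pounds) on two consecutive days and
--     everyday the bank will add your last two balances together to give you a new
--     balance.
--
--     For example:
--     - You deposit £10 on day 1.
--     - You deposit £20 on day 2.
--
--     Your balance on:
--     - day 1 would be £10
--     - day 2 would be £30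
--     - day 3 would be £40
--     - day 4 would be £70
--     """
--
--     prev_balance = 0
--     curr_balance = deposit1
--
--     yield curr_balance
--
--     prev_balance = curr_balance
--     curr_balance += deposit2
--
--     while True:
--         yield curr_balance
--
--         temp = prev_balance
--         prev_balance = curr_balance
--         curr_balance += temp
--
-- def simulate_competition_entry(deposit1: int, deposit2: int, threshhold: int) -> (bool, List[int]):
--     """
--     Simulates the following proposition:
--
--     A bank is running a competition. You can make two deposits (of integer
--     pounds) on two consecutive days and everyday the bank will add your last two
--     balances together to give you a new balance.
--
--     For example: You deposit £10 on day 1 and £20 on day 2. Your balance on day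
--     1 would be £10, day 2 £30, day 3 £40, day 4 £70 and so on.....
--
--     You can keep the money if your balance eventually equals one million pounds
--     exactly. If more than one person hits a million exactly, the prize goes to
--     the person who took the longest to get there.
--
--     This function, given the necessary 2 deposits, returns a tuple where [0] is
--     a bool that shows whether the balance ever exactly equaled the threshold and
--     [1] shows the account balance history.
--     """
--
--     bank_balance_simulation = simulate_bank_balance(deposit1, deposit2)
--
--     balance_history = []
--     balance = 0
--     while balance < threshhold:
--         balance = next(bank_balance_simulation)
--         balance_history.append(balance)
--
--     can_they_keep_the_money = (balance == threshhold)
--     return can_they_keep_the_money, balance_history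
-- ===== SOURCE B (Python) =====
-- def simulate_competition_entry(deposit1, deposit2, threshhold):
--     def _history(a, b, balance):
--         if balance >= threshhold:
--             return []
--         return [a] + _history(b, a + b, a)
--     history = _history(deposit1, deposit1 + deposit2, 0)
--     return ((history[-1] if history else 0) == threshhold, history)
-- ===== Notes on version B (the rewrite author's own statement) =====
-- stated objective: simpler
-- what changed: Replaces the infinite generator plus consuming while-loop-with-accumulators by one self-contained recursion that builds the history front-to-back, deriving the success flag from the last history element instead of a carried balance variable.
import Mathlib
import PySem

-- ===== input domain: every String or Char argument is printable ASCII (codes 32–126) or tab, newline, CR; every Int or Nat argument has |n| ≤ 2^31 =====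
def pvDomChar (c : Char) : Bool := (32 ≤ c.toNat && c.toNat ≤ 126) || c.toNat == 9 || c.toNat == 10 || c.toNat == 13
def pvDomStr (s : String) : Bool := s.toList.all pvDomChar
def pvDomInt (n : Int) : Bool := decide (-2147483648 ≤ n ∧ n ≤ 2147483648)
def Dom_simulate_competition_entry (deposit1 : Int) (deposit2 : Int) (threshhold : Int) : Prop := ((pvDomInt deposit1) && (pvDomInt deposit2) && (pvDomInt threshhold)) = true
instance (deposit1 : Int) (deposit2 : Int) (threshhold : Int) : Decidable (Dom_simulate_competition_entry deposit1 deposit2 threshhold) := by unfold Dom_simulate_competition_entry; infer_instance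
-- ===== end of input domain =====

-- B replaces the generator + consuming while loop by a single self-contained recursion that
-- builds the history front-to-back and reads the success flag off the last history element
-- (objective: simpler).

-- ===== PORT A =====
-- A's while loop consuming the generator `simulate_bank_balance`.  The generator's prologue
-- (yield deposit1, then enter the steady state prev=deposit1, curr=deposit1+deposit2) is
-- transcribed in `simulate_competition_entry` below; `pvLoopA` is the steady-state loop:
-- each iteration pulls `curr` from the generator (new generator state prev'=curr,
-- curr'=curr+prev), appends it to the history and re-tests `balance < threshhold`.
-- The Nat fuel only makes the loop total (the Python loop diverges on some inputs);
-- at fuel 0 it returns the loop's exit value for the state reached.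
def pvLoopA : Nat → Int → Int → Int → Int → List Int → Bool × List Int
  | 0, t, _, _, balance, hist => (balance == t, hist)
  | n+1, t, prev, curr, balance, hist =>
      if balance < t then pvLoopA n t curr (curr + prev) curr (hist ++ [curr])
      else (balance == t, hist)

def simulate_competition_entry (deposit1 : Int) (deposit2 : Int) (threshhold : Int) : Bool × List Int :=
  -- balance = 0; while balance < threshhold: first `next` yields deposit1 (generator prologue),
  -- then the steady-state loop continues with prev=deposit1, curr=deposit1+deposit2.
  if (0 : Int) < threshhold then
    pvLoopA 300 threshhold deposit1 (deposit1 + deposit2) deposit1 [deposit1]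
  else
    ((0 : Int) == threshhold, [])

-- ===== PORT B =====
-- Source B's `_history(a, b, balance)`: [] once balance ≥ threshhold, else a :: _history(b, a+b, a).
-- The Nat fuel only makes the recursion total (Source B recurses forever on the same inputs).
def pvHistB : Nat → Int → Int → Int → Int → List Int
  | 0, _, _, _, _ => []
  | n+1, a, b, balance, t =>
      if balance ≥ t then []
      else a :: pvHistB n b (a + b) a t

def simulate_competition_entry_alt (deposit1 : Int) (deposit2 : Int) (threshhold : Int) : Bool × List Int :=
  let history := pvHistB 301 deposit1 (deposit1 + deposit2) 0 threshhold
  -- (history[-1] if history else 0) == threshhold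
  (history.getLast?.getD 0 == threshhold, history)

-- ===== PRECONDITION & SPEC =====
-- No Pre_: the ports (fuel-totalised) agree on every input; where Python A diverges nothing is claimed.
def Spec_simulate_competition_entry (deposit1 : Int) (deposit2 : Int) (threshhold : Int) (out : Bool × List Int) : Prop := out = simulate_competition_entry_alt deposit1 deposit2 threshhold
instance (deposit1 : Int) (deposit2 : Int) (threshhold : Int) (out : Bool × List Int) : Decidable (Spec_simulate_competition_entry deposit1 deposit2 threshhold out) := by unfold Spec_simulate_competition_entry; infer_instance

-- ===== CLAIM (what is proved, stated in full; the proofs are below) =====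
def Claim_equal_simulate_competition_entry : Prop := ∀ (deposit1 : Int) (deposit2 : Int) (threshhold : Int), Dom_simulate_competition_entry deposit1 deposit2 threshhold → Spec_simulate_competition_entry deposit1 deposit2 threshhold (simulate_competition_entry deposit1 deposit2 threshhold)

-- ===== LEMMAS AND PROOFS =====

theorem pvGetLastD_cons (l : List Int) : ∀ (a x : Int),
    ((a :: l).getLast?).getD x = (l.getLast?).getD a := by
  induction l with
  | nil => intro a x; rfl
  | cons b l' ih =>
      intro a x
      rw [List.getLast?_cons_cons, ih b x, ih b a]

-- Loop correspondence: A's steady-state loop equals B's recursion on the matching state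
-- (B's next yield a = A's curr, B's following yield b = A's curr + prev), for every fuel.
theorem pvLoopA_eq_histB (n : Nat) :
    ∀ (t prev curr balance : Int) (hist : List Int),
      pvLoopA n t prev curr balance hist =
        (((pvHistB n curr (curr + prev) balance t).getLast?).getD balance == t,
          hist ++ pvHistB n curr (curr + prev) balance t) := by
  induction n with
  | zero => intro t prev curr balance hist; simp [pvLoopA, pvHistB]
  | succ n ih =>
      intro t prev curr balance hist
      by_cases h : balance < t
      · have hnot : ¬ balance ≥ t := by omega
        simp only [pvLoopA, pvHistB, if_pos h, if_neg hnot]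
        rw [ih t curr (curr + prev) curr (hist ++ [curr])]
        have harg : curr + prev + curr = curr + (curr + prev) := by ring
        rw [harg, pvGetLastD_cons]
        simp
      · have hge : balance ≥ t := by omega
        simp [pvLoopA, pvHistB, if_neg h, if_pos hge]

-- ===== VERDICT (by name: the statement is the Claim_ definition above) =====
theorem simulate_competition_entry_spec : Claim_equal_simulate_competition_entry := by
  intro d1 d2 t _
  unfold Spec_simulate_competition_entry simulate_competition_entry simulate_competition_entry_alt
  by_cases h : (0 : Int) < t
  · have hnot : ¬ (0 : Int) ≥ t := by omega
    simp only [if_pos h]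
    rw [pvLoopA_eq_histB 300 t d1 (d1 + d2) d1 [d1]]
    show _ = (_, _)
    conv_rhs => rw [pvHistB]
    simp only [if_neg hnot]
    have harg : d1 + d2 + d1 = d1 + (d1 + d2) := by ring
    rw [pvGetLastD_cons, harg]
    simp
  · have hge : (0 : Int) ≥ t := by omega
    simp only [if_neg h]
    show _ = (_, _)
    conv_rhs => rw [pvHistB]
    simp [if_pos hge]
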